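-- pv_equiv track=rewrite | github.com/RobertsMJ/aoc21 | day08/part1.py | has_all_layouts
-- ===== SOURCE A (Python) =====
-- from typing import Counter
--
-- valid_layouts = [
--     ["top", "tl", "tr", "bl", "br", "bot"],  # 0
--     ["tr", "br"],  # 1
--     ["top", "tr", "mid", "bl", "bot"],  # 2
--     ["top", "tr", "mid", "br", "bot"],  # 3
--     ["tl", "tr", "mid", "br"],  # 4
--     ["top", "tl", "mid", "br", "bot"],  # 5
--     ["top", "tl", "mid", "bl", "br", "bot"],  # 6,
--     ["top", "tr", "br"],  # 7
--     ["top", "tl", "tr", "mid", "bl", "br", "bot"],  # 8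
--     ["top", "tl", "tr", "mid", "br", "bot"],  # 9
-- ]
--
-- def has_all_layouts(display_configuration, signals):
--     # check if the display mapping has a valid configuration for every digit
--     # for every signal
--     available_layouts = valid_layouts[:]
--     for signal in signals:
--         config = []
--         for segment in signal:
--             for position in display_configuration:
--                 if segment in display_configuration[position]:
--                     config.append(position)
--                     break
--
--         # for every layout that hasn't been accounted for
--         # is there a valid layout available?
--         for layout in available_layouts:
--             if Counter(layout) == Counter(config):
--                 available_layouts.remove(layout)
--                 break
--     # if all layouts were found, this is a valid configuration
--     return len(available_layouts) == 0
-- ===== SOURCE B (Python) =====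
-- valid_layouts = [
--     ["top", "tl", "tr", "bl", "br", "bot"],  # 0
--     ["tr", "br"],  # 1
--     ["top", "tr", "mid", "bl", "bot"],  # 2
--     ["top", "tr", "mid", "br", "bot"],  # 3
--     ["tl", "tr", "mid", "br"],  # 4
--     ["top", "tl", "mid", "br", "bot"],  # 5
--     ["top", "tl", "mid", "bl", "br", "bot"],  # 6,
--     ["top", "tr", "br"],  # 7
--     ["top", "tl", "tr", "mid", "bl", "br", "bot"],  # 8
--     ["top", "tl", "tr", "mid", "br", "bot"],  # 9
-- ]
--
-- def has_all_layouts(display_configuration, signals):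
--     # invert the mapping once: segment character -> first position containing it
--     index = {}
--     for position, segments in display_configuration.items():
--         for segment in segments:
--             index.setdefault(segment, position)
--     # collect every signal's canonical (sorted) config into a set
--     seen = set()
--     for sig in signals:
--         seen.add(tuple(sorted(index[c] for c in sig if c in index)))
--     # valid iff every layout's canonical form is covered
--     return all(tuple(sorted(layout)) in seen for layout in valid_layouts)
-- ===== Notes on version B (the rewrite author's own statement) =====
-- stated objective: faster
-- what changed: Replaces A's per-segment scan over the dict and its mutable available-layouts list (Counter-equality scan-and-remove per signal) by a precomputed inverted segment-to-position index, a set of canonical sorted configs built in one pass, and a final coverage check over the fixed layout list.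
import Mathlib
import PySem

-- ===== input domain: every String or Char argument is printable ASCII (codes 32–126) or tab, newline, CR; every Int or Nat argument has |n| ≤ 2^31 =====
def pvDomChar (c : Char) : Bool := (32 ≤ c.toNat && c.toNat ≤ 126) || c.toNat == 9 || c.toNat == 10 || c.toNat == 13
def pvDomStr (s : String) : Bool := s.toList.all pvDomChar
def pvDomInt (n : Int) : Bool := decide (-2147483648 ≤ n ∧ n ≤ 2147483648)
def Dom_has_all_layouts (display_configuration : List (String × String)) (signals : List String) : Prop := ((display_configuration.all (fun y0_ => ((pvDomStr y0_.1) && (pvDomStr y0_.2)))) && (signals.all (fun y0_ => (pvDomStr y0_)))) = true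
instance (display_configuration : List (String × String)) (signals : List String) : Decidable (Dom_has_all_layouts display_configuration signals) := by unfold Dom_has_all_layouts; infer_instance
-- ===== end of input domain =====

-- B replaces A's per-segment inner scan over the dict and its mutable available-layouts list
-- (Counter-equality scan + remove per signal) by a precomputed inverted segment→position index,
-- a set of canonical sorted configs, and one coverage check over the layouts; objective: faster
-- (constant-factor: no per-signal dict scans, Counter rebuilds or list removals).

-- the module-level valid_layouts list (shared context of both Pythons)
def validLayouts : List (List String) := [
  ["top", "tl", "tr", "bl", "br", "bot"],
  ["tr", "br"],
  ["top", "tr", "mid", "bl", "bot"],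
  ["top", "tr", "mid", "br", "bot"],
  ["tl", "tr", "mid", "br"],
  ["top", "tl", "mid", "br", "bot"],
  ["top", "tl", "mid", "bl", "br", "bot"],
  ["top", "tr", "br"],
  ["top", "tl", "tr", "mid", "bl", "br", "bot"],
  ["top", "tl", "tr", "mid", "br", "bot"]]

-- ===== PORT A =====
-- A's per-signal config loop: for each segment, the first dict key whose value contains the
-- segment is appended ('for position in …: if segment in …: append; break')
def configOf (positions : List String) (d : PySem.Dict String String) (signal : String) : List String :=
  signal.toList.foldl (fun config segment =>
    match positions.find? (fun position => PySem.Str.isIn (String.ofList [segment]) (d.getD position "")) with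
    | some position => config ++ [position]
    | none => config) []

-- Counter(xs) == Counter(ys): Python dict equality ignores order — equal key sets and equal counts
def counterEq (xs ys : List String) : Bool :=
  PySem.Set.equal (PySem.Dict.counter xs).keys (PySem.Dict.counter ys).keys &&
  (PySem.Dict.counter xs).keys.all (fun k => (PySem.Dict.counter xs).getD k 0 == (PySem.Dict.counter ys).getD k 0)

-- one iteration of A's outer loop: find the first layout whose Counter equals the config's, remove it
def stepA (positions : List String) (d : PySem.Dict String String)
    (avail : List (List String)) (signal : String) : List (List String) :=
  match avail.find? (fun layout => counterEq layout (configOf positions d signal)) with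
  | some layout => (PySem.List.remove? avail layout).getD avail
  | none => avail

def has_all_layouts (display_configuration : List (String × String)) (signals : List String) : Bool :=
  decide ((signals.foldl
      (stepA (PySem.Dict.ofList display_configuration).keys (PySem.Dict.ofList display_configuration))
      validLayouts).length = 0)

-- ===== PORT B =====
-- inverted index: segment character → first position whose segment string contains it
-- ('for position, segments in dc.items(): for segment in segments: index.setdefault(segment, position)')
def buildIndex (display_configuration : List (String × String)) : PySem.Dict Char String :=
  (PySem.Dict.ofList display_configuration).items.foldl
    (fun idx item => item.2.toList.foldl (fun i segment => i.setdefault segment item.1) idx)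
    PySem.Dict.empty

-- tuple(sorted(l)): the canonical form of a config or layout
def canon (l : List String) : List String := PySem.List.sorted l (fun x => x) false

def has_all_layouts_alt (display_configuration : List (String × String)) (signals : List String) : Bool :=
  let index := buildIndex display_configuration
  let seen := signals.foldl
    (fun seen sig => PySem.Set.add seen (canon (sig.toList.filterMap (fun c => index.get? c))))
    PySem.Set.empty
  validLayouts.all (fun layout => PySem.Set.contains seen (canon layout))

-- ===== PRECONDITION & SPEC =====
def Spec_has_all_layouts (display_configuration : List (String × String)) (signals : List String) (out : Bool) : Prop := out = has_all_layouts_alt display_configuration signals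
instance (display_configuration : List (String × String)) (signals : List String) (out : Bool) : Decidable (Spec_has_all_layouts display_configuration signals out) := by unfold Spec_has_all_layouts; infer_instance

-- ===== CLAIM (what is proved, stated in full; the proofs are below) =====
def Claim_equal_has_all_layouts : Prop := ∀ (display_configuration : List (String × String)) (signals : List String), Dom_has_all_layouts display_configuration signals → Spec_has_all_layouts display_configuration signals (has_all_layouts display_configuration signals)

-- ===== LEMMAS AND PROOFS =====

-- a one-element list is an infix iff its element is a member
theorem singleton_infix_iff (c : Char) (l : List Char) : [c] <:+: l ↔ c ∈ l := by
  constructor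
  · intro h; exact h.subset (by simp)
  · intro h
    obtain ⟨s, t, rfl⟩ := List.append_of_mem h
    exact ⟨s, t, by simp⟩

-- 'segment in d[position]' for a single character is list membership
theorem isIn_singleton (c : Char) (l : List Char) :
    PySem.Chars.isIn [c] l = l.contains c := by
  rw [Bool.eq_iff_iff, PySem.Chars.isIn_iff_infix]
  simp [singleton_infix_iff]

-- the inner setdefault loop of buildIndex: an existing binding wins, else first membership
theorem innerFold_get? (cs : List Char) (idx : PySem.Dict Char String) (p : String) (c : Char) :
    (cs.foldl (fun i c' => i.setdefault c' p) idx).get? c =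
      (match idx.get? c with
       | some v => some v
       | none => if c ∈ cs then some p else none) := by
  induction cs generalizing idx with
  | nil => cases hx : idx.get? c <;> simp [hx]
  | cons c' cs ih =>
    rw [List.foldl_cons, ih]
    by_cases hc : c = c'
    · subst hc
      rw [PySem.Dict.get?_setdefault_self]
      cases idx.get? c <;> simp
    · rw [PySem.Dict.get?_setdefault_of_ne _ _ hc]
      cases idx.get? c <;> simp [hc]

-- the outer loop of buildIndex over the dict items
theorem outerFold_get? (l : List (String × String)) (d0 : PySem.Dict Char String) (c : Char) :
    (l.foldl (fun idx item => item.2.toList.foldl (fun i seg => i.setdefault seg item.1) idx) d0).get? c =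
      (match d0.get? c with
       | some v => some v
       | none => (l.find? (fun item => item.2.toList.contains c)).map (·.1)) := by
  induction l generalizing d0 with
  | nil => cases hx : d0.get? c <;> simp [hx]
  | cons it l ih =>
    rw [List.foldl_cons, ih, innerFold_get?]
    cases h0 : d0.get? c with
    | some v => simp
    | none =>
      by_cases hm : c ∈ it.2.toList
      · simp [List.find?_cons_of_pos, hm]
      · rw [List.find?_cons_of_neg (by simpa using hm)]
        simp [hm]

-- B's index lookup IS A's inner first-match scan over the dict keys
theorem buildIndex_get?_eq_find? (dc : List (String × String)) (c : Char) :
    (buildIndex dc).get? c =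
      (PySem.Dict.ofList dc).keys.find?
        (fun position => PySem.Str.isIn (String.ofList [c]) ((PySem.Dict.ofList dc).getD position "")) := by
  unfold buildIndex
  rw [outerFold_get?, PySem.Dict.get?_empty]
  rw [PySem.Dict.items_eq_map_keys (PySem.Dict.ofList dc) (PySem.Dict.nodup_keys_ofList dc) ""]
  rw [List.find?_map]
  have hp : ((fun item : String × String => item.2.toList.contains c) ∘
      (fun k => (k, (PySem.Dict.ofList dc).getD k ""))) =
      (fun position => PySem.Str.isIn (String.ofList [c]) ((PySem.Dict.ofList dc).getD position "")) := by
    funext k; simp [Function.comp, isIn_singleton]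
  rw [hp]
  cases (PySem.Dict.ofList dc).keys.find?
      (fun position => PySem.Str.isIn (String.ofList [c]) ((PySem.Dict.ofList dc).getD position "")) <;> simp

-- A's append loop is a filterMap over the signal's characters
theorem configOf_eq_filterMap (positions : List String) (d : PySem.Dict String String) (signal : String) :
    configOf positions d signal =
      signal.toList.filterMap
        (fun segment => positions.find? (fun position => PySem.Str.isIn (String.ofList [segment]) (d.getD position ""))) := by
  unfold configOf
  generalize signal.toList = cs
  suffices h : ∀ acc : List String,
      cs.foldl (fun config segment =>
        match positions.find? (fun position => PySem.Str.isIn (String.ofList [segment]) (d.getD position "")) with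
        | some position => config ++ [position]
        | none => config) acc
      = acc ++ cs.filterMap
          (fun segment => positions.find? (fun position => PySem.Str.isIn (String.ofList [segment]) (d.getD position ""))) by
    simpa using h []
  induction cs with
  | nil => intro acc; simp
  | cons c cs ih =>
    intro acc
    rw [List.foldl_cons, List.filterMap_cons]
    cases positions.find? (fun position => PySem.Str.isIn (String.ofList [c]) (d.getD position "")) with
    | some p => rw [ih]; simp
    | none => rw [ih]

-- hence the two per-signal configs coincide
theorem configOf_eq_alt (dc : List (String × String)) (signal : String) :
    configOf (PySem.Dict.ofList dc).keys (PySem.Dict.ofList dc) signal =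
      signal.toList.filterMap (fun c => (buildIndex dc).get? c) := by
  rw [configOf_eq_filterMap]
  apply List.filterMap_congr
  intro c _
  rw [buildIndex_get?_eq_find?]

-- Counter equality is multiset equality (permutation)
theorem counterEq_iff_perm (xs ys : List String) :
    counterEq xs ys = true ↔ xs.Perm ys := by
  unfold counterEq
  rw [List.perm_iff_count]
  simp only [Bool.and_eq_true, PySem.Set.equal_iff, PySem.Dict.keys_counter,
    PySem.Dict.getD_counter, List.all_eq_true, PySem.Set.mem_ofList, beq_iff_eq, Nat.cast_inj]
  constructor
  · rintro ⟨hs, hc⟩ a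
    by_cases ha : a ∈ xs
    · exact hc a ha
    · have hb : a ∉ ys := fun hb => ha ((hs a).mpr hb)
      simp [List.count_eq_zero_of_not_mem ha, List.count_eq_zero_of_not_mem hb]
  · intro h
    refine ⟨fun a => ?_, fun a _ => h a⟩
    constructor
    · intro ha
      have := h a
      rw [← List.count_pos_iff] at ha ⊢
      omega
    · intro ha
      have := h a
      rw [← List.count_pos_iff] at ha ⊢
      omega

-- one step of A, on a list of pairwise non-equivalent layouts, is a filter
theorem stepA_eq_filter (positions : List String) (d : PySem.Dict String String)
    (signal : String) (avail : List (List String))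
    (h : avail.Pairwise (fun a b => ¬ a.Perm b)) :
    stepA positions d avail signal
      = avail.filter (fun l => !counterEq l (configOf positions d signal)) := by
  induction avail with
  | nil => rfl
  | cons a rest ih =>
    rw [List.pairwise_cons] at h
    obtain ⟨hna, hrest⟩ := h
    by_cases hc : counterEq a (configOf positions d signal) = true
    · unfold stepA
      rw [List.find?_cons_of_pos (p := fun layout => counterEq layout (configOf positions d signal)) hc]
      have htail : List.filter (fun l => !counterEq l (configOf positions d signal)) rest = rest := by
        apply List.filter_eq_self.mpr
        intro l hl
        rw [Bool.not_eq_eq_eq_not, Bool.not_true, ← Bool.not_eq_true, counterEq_iff_perm]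
        intro hkey
        rw [counterEq_iff_perm] at hc
        exact hna l hl (hc.trans hkey.symm)
      simp [PySem.List.remove?_cons_self, hc, htail]
    · have hstep := ih hrest
      unfold stepA at hstep ⊢
      rw [List.find?_cons_of_neg (p := fun layout => counterEq layout (configOf positions d signal)) (by simpa using hc)]
      simp only [List.filter_cons, hc, Bool.not_false]
      cases hf : (rest.find? (fun layout => counterEq layout (configOf positions d signal))) with
      | none =>
        rw [hf] at hstep
        simp [← hstep]
      | some layout =>
        rw [hf] at hstep
        dsimp only at hstep ⊢
        have hmem : layout ∈ rest := List.mem_of_find?_eq_some hf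
        have hlt : counterEq layout (configOf positions d signal) = true := by
          have := List.find?_some hf; simpa using this
        have hne : a ≠ layout := by
          intro hEq; rw [hEq] at hc; exact hc hlt
        rw [PySem.List.remove?_eq_some_erase rest layout hmem] at hstep
        rw [PySem.List.remove?_cons_of_ne rest hne, PySem.List.remove?_eq_some_erase rest layout hmem]
        simpa using hstep

-- folding A's step over the signals filters out every layout some signal's config matches
theorem foldl_stepA_eq_filter (positions : List String) (d : PySem.Dict String String)
    (signals : List String) (avail : List (List String))
    (h : avail.Pairwise (fun a b => ¬ a.Perm b)) :
    signals.foldl (stepA positions d) avail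
      = avail.filter (fun l => signals.all (fun s => !counterEq l (configOf positions d s))) := by
  induction signals generalizing avail with
  | nil => simp
  | cons s ss ih =>
    rw [List.foldl_cons, stepA_eq_filter positions d s avail h]
    rw [ih _ (List.Pairwise.sublist List.filter_sublist h)]
    rw [List.filter_filter]
    apply List.filter_congr
    intro l _
    simp [Bool.and_comm]

theorem pairwise_validLayouts : validLayouts.Pairwise (fun a b => ¬ a.Perm b) := by decide

-- ===== VERDICT (by name: the statement is the Claim_ definition above) =====
theorem has_all_layouts_spec : Claim_equal_has_all_layouts := by
  intro dc signals _
  unfold Spec_has_all_layouts has_all_layouts has_all_layouts_alt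
  dsimp only
  rw [foldl_stepA_eq_filter _ _ _ _ pairwise_validLayouts]
  rw [← PySem.Set.update_map_eq_foldl_add signals
        (fun sig => canon (sig.toList.filterMap (fun c => (buildIndex dc).get? c))),
      PySem.Set.update_empty]
  rw [Bool.eq_iff_iff]
  simp only [decide_eq_true_eq, List.length_eq_zero_iff, List.filter_eq_nil_iff,
    List.all_eq_true, PySem.Set.contains_iff, PySem.Set.mem_ofList, List.mem_map,
    Bool.not_eq_eq_eq_not, Bool.not_true, ← Bool.not_eq_true, not_forall, not_not]
  constructor
  · intro h l hl
    obtain ⟨s, hs, hcs⟩ := h l hl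
    rw [counterEq_iff_perm] at hcs
    rw [configOf_eq_alt] at hcs
    exact ⟨s, hs, by unfold canon; rw [PySem.List.sorted_id_eq_sorted_id_iff_perm]; exact hcs.symm⟩
  · intro h l hl
    obtain ⟨s, hs, hcs⟩ := h l hl
    unfold canon at hcs
    rw [PySem.List.sorted_id_eq_sorted_id_iff_perm] at hcs
    exact ⟨s, hs, (counterEq_iff_perm _ _).mpr (by rw [configOf_eq_alt]; exact hcs.symm)⟩
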